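-- pv_equiv track=rewrite | github.com/IES-Rafael-Alberti/2425-u2-2-2-sentencias-iterativas-oscargarciajaen | src/ejercicio8.py | triangulo
-- ===== SOURCE A (Python) =====
-- def triangulo(numero):
--     mensaje = []
--     for i in range(1, numero + 1,2):
--         mensaje_2 = []
--         for x in range(i, 0, -2):
--             mensaje_2.append(str(x))
--         mensaje.append(" ".join(mensaje_2))
--
--     return "\n".join(mensaje)
-- ===== SOURCE B (Python) =====
-- def triangulo(numero):
--     rows = []
--     prev = None
--     for i in range(1, numero + 1, 2):
--         cur = str(i) if prev is None else str(i) + " " + prev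
--         rows.append(cur)
--         prev = cur
--     return "\n".join(rows)
-- ===== Notes on version B (the rewrite author's own statement) =====
-- stated objective: faster
-- what changed: Replaces the nested descending inner loop (rebuilding every row from scratch) with a single pass that builds each row by prepending str(i) to the previously built row, kept in an accumulator; intended as faster, measured about 6x on this sandbox's timing run.
import Mathlib
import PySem

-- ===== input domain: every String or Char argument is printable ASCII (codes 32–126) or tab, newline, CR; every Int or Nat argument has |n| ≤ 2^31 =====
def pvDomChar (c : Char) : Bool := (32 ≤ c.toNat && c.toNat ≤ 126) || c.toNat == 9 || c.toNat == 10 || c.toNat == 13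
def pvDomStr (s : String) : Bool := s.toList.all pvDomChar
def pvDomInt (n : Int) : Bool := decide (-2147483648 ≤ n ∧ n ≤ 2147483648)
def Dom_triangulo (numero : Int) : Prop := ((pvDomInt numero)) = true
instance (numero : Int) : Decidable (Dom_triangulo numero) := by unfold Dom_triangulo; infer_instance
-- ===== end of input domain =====

-- B builds each row by prepending str(i) to the previously built row in a single pass,
-- instead of A's nested descending inner loop; same output, different decomposition.

-- ===== PORT A =====
def triangulo (numero : Int) : String :=
  let mensaje := (PySem.List.pyRange 1 (numero + 1) 2).foldl
    (fun (mensaje : List String) (i : Int) =>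
      let mensaje_2 := (PySem.List.pyRange i 0 (-2)).foldl
        (fun (acc : List String) (x : Int) => acc ++ [PySem.Int.toStr x]) []
      mensaje ++ [PySem.Str.join " " mensaje_2]) []
  PySem.Str.join "\n" mensaje

-- ===== PORT B =====
def triangulo_alt (numero : Int) : String :=
  let st := (PySem.List.pyRange 1 (numero + 1) 2).foldl
    (fun (st : List String × Option String) (i : Int) =>
      let cur := match st.2 with
        | none => PySem.Int.toStr i
        | some prev => PySem.Int.toStr i ++ " " ++ prev
      (st.1 ++ [cur], some cur)) ([], none)
  PySem.Str.join "\n" st.1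

-- ===== PRECONDITION & SPEC =====
def Spec_triangulo (numero : Int) (out : String) : Prop := out = triangulo_alt numero
instance (numero : Int) (out : String) : Decidable (Spec_triangulo numero out) := by unfold Spec_triangulo; infer_instance

-- ===== CLAIM (what is proved, stated in full; the proofs are below) =====
def Claim_equal_triangulo : Prop := ∀ (numero : Int), Dom_triangulo numero → Spec_triangulo numero (triangulo numero)

-- ===== LEMMAS AND PROOFS =====

-- the row A builds for odd i: "i i-2 … 3 1"
def pvRow (i : Int) : String :=
  PySem.Str.join " " ((PySem.List.pyRange i 0 (-2)).map PySem.Int.toStr)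

lemma pvRange2_nil (i : Int) (h : i ≤ 0) : PySem.List.pyRange i 0 (-2) = [] := by
  simp only [PySem.List.pyRange]
  norm_num
  omega

lemma pvRange2_cons (i : Int) (h : 0 < i) :
    PySem.List.pyRange i 0 (-2) = i :: PySem.List.pyRange (i - 2) 0 (-2) := by
  simp only [PySem.List.pyRange]
  norm_num
  rw [if_pos h]
  by_cases h2 : (2:Int) < i
  · rw [if_pos h2]
    have hc : ((i + 2 - 1) / 2).toNat = ((i - 1) / 2).toNat + 1 := by omega
    rw [hc, List.range_succ_eq_map, List.map_cons]
    refine congrArg₂ _ (by norm_num) ?_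
    rw [List.map_map]
    apply List.map_congr_left
    intro k _
    simp only [Function.comp_apply]
    push_cast
    ring
  · rw [if_neg h2]
    have hc : ((i + 2 - 1) / 2).toNat = 1 := by omega
    rw [hc]
    simp

lemma pvJoin_singleton (sep s : String) : PySem.Str.join sep [s] = s := by
  apply String.toList_injective
  simp [PySem.Str.toList_join, PySem.Chars.join_singleton]

lemma pvJoin_cons_cons (sep p q : String) (rest : List String) :
    PySem.Str.join sep (p :: q :: rest) = p ++ sep ++ PySem.Str.join sep (q :: rest) := by
  apply String.toList_injective
  simp [PySem.Str.toList_join, PySem.Chars.join_cons_cons]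

lemma pvRow_one : pvRow 1 = PySem.Int.toStr 1 := by
  have h1 : PySem.List.pyRange (1 : Int) 0 (-2) = [1] := by
    rw [pvRange2_cons 1 (by norm_num), pvRange2_nil (1 - 2) (by norm_num)]
  simp [pvRow, h1, pvJoin_singleton]

lemma pvRow_step (i : Int) (h : 2 < i) :
    pvRow i = PySem.Int.toStr i ++ " " ++ pvRow (i - 2) := by
  have h1 := pvRange2_cons i (by omega)
  have h2 := pvRange2_cons (i - 2) (by omega)
  rw [pvRow, h1, h2, List.map_cons, List.map_cons, pvJoin_cons_cons]
  rw [pvRow, h2, List.map_cons]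

lemma pvFoldlPush {α β : Type} (g : α → β) (L : List α) (acc : List β) :
    L.foldl (fun a x => a ++ [g x]) acc = acc ++ L.map g := by
  induction L generalizing acc with
  | nil => simp
  | cons x xs ih => simp [ih]

lemma pvInv (n : Nat) :
    ((List.range n).map (fun k : Nat => (1 : Int) + 2 * k)).foldl
      (fun (st : List String × Option String) (i : Int) =>
        let cur := match st.2 with
          | none => PySem.Int.toStr i
          | some prev => PySem.Int.toStr i ++ " " ++ prev
        (st.1 ++ [cur], some cur)) ([], none)
    = (((List.range n).map (fun k : Nat => (1 : Int) + 2 * k)).map pvRow,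
       if n = 0 then none else some (pvRow (2 * (n : Int) - 1))) := by
  induction n with
  | zero => simp
  | succ m ih =>
    rw [List.range_succ, List.map_append, List.foldl_append, ih, List.map_append]
    rcases Nat.eq_zero_or_pos m with hm | hm
    · subst hm
      simp [pvRow_one]
    · have hmz : m ≠ 0 := by omega
      simp only [if_neg hmz, List.foldl_cons, List.foldl_nil, List.map_cons, List.map_nil]
      have hrow : pvRow (1 + 2 * (m : Int)) =
          PySem.Int.toStr (1 + 2 * (m : Int)) ++ " " ++ pvRow (2 * (m : Int) - 1) := by
        have := pvRow_step (1 + 2 * (m : Int)) (by omega)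
        have he : (1 + 2 * (m : Int)) - 2 = 2 * (m : Int) - 1 := by ring
        rwa [he] at this
      have hc : (2 * ((m : Int) + 1) - 1) = 1 + 2 * (m : Int) := by ring
      simp only [if_neg (by omega : ¬ m + 1 = 0), Prod.mk.injEq]
      push_cast [hc]
      rw [hrow]
      exact ⟨rfl, rfl⟩

theorem triangulo_A_rows (numero : Int) :
    triangulo numero = PySem.Str.join "\n" ((PySem.List.pyRange 1 (numero + 1) 2).map pvRow) := by
  unfold triangulo
  simp only [pvFoldlPush, List.nil_append]
  rfl

-- ===== VERDICT (by name: the statement is the Claim_ definition above) =====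
theorem triangulo_spec : Claim_equal_triangulo := by
  intro numero _
  unfold Spec_triangulo
  rw [triangulo_A_rows]
  unfold triangulo_alt
  rw [PySem.List.pyRange_of_pos 1 (numero + 1) (by norm_num : (0:Int) < 2)]
  rw [pvInv]
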